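-- pv_equiv track=rewrite | github.com/bec-aiml-projects/CM02 | code/utils/file_utils.py | get_file_tree_from_dict
-- ===== SOURCE A (Python) =====
-- def get_file_tree_from_dict(files: dict[str, str]) -> str:
--     """
--     Generate a visual file tree from the generated files dictionary.
--
--     Parameters
--     ----------
--     files : dict[str, str]
--         Mapping of relative file paths to their content.
--
--     Returns
--     -------
--     str
--         A formatted file tree string.
--     """
--     if not files:
--         return "(no files)"
--
--     # Build tree structure
--     tree: dict = {}
--     for path in sorted(files.keys()):
--         parts = path.replace("\\", "/").strip("/").split("/")
--         current = tree
--         for part in parts: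
--             if part not in current:
--                 current[part] = {}
--             current = current[part]
--
--     def render(node: dict, prefix: str = "") -> list[str]:
--         lines = []
--         items = list(node.items())
--         for i, (name, children) in enumerate(items):
--             is_last = i == len(items) - 1
--             connector = "└── " if is_last else "├── "
--             lines.append(f"{prefix}{connector}{name}")
--             if children:
--                 ext = "    " if is_last else "│   "
--                 lines.extend(render(children, prefix + ext))
--         return lines
--
--     return "\n".join(render(tree))
-- ===== SOURCE B (Python) =====
-- def get_file_tree_from_dict(files: dict[str, str]) -> str:
--     """Render the same ASCII tree without building A's nested dict: recursively
--     group the sorted, cleaned component lists by first component, one pass per level."""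
--     if not files:
--         return "(no files)"
--
--     paths = [p.replace("\\", "/").strip("/").split("/") for p in sorted(files)]
--
--     def render(group: list[list[str]], prefix: str) -> list[str]:
--         heads = []
--         tails = {}
--         for p in group:
--             h = p[0]
--             if h not in tails:
--                 tails[h] = []
--                 heads.append(h)
--             if len(p) > 1:
--                 tails[h].append(p[1:])
--         lines = []
--         for i, h in enumerate(heads):
--             last = i == len(heads) - 1
--             lines.append(prefix + ("└── " if last else "├── ") + h)
--             if tails[h]:
--                 lines.extend(render(tails[h], prefix + ("    " if last else "│   ")))
--         return lines
--
--     return "\n".join(render(paths, ""))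
-- ===== Notes on version B (the rewrite author's own statement) =====
-- stated objective: alternative
-- what changed: B never builds A's nested dict tree: it cleans and sorts the paths once, then emits the lines by recursively grouping the component lists level by level (one grouping pass per level collecting first-occurrence heads and per-head tails), deriving sibling order, dedup and last-sibling detection directly from the grouped lists.
import Mathlib
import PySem

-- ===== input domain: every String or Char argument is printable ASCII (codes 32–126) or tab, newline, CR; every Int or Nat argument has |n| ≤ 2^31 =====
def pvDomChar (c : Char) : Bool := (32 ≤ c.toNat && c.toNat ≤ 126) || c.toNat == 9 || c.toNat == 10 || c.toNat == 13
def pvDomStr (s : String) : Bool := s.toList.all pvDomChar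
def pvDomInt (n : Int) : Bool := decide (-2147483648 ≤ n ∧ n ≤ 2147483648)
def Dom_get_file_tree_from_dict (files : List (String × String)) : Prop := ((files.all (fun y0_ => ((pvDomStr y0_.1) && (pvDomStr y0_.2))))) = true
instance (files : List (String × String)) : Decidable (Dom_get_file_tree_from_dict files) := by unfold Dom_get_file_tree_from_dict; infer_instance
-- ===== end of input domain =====

-- B renders the tree without ever building A's nested dict: it recursively groups the
-- sorted cleaned path-component lists by first component (objective: alternative).

-- ===== PORT A =====
-- A's nested Python dicts are encoded first-child/next-sibling:
-- `nil` = {}, `cons name child rest` = the entry `name: child` followed by the rest of the dict.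
inductive PvForest where
  | nil : PvForest
  | cons : String → PvForest → PvForest → PvForest
deriving DecidableEq, Repr

-- `current = tree; for part in parts: if part not in current: current[part] = {}; current = current[part]`
-- (a new key is appended at the end of the dict, an existing key keeps its position)
def PvForest.insertParts : PvForest → List String → PvForest
  | f, [] => f
  | .nil, p :: rest => .cons p (PvForest.insertParts .nil rest) .nil
  | .cons n c r, p :: rest =>
      if n = p then .cons n (PvForest.insertParts c rest) r
      else .cons n c (PvForest.insertParts r (p :: rest))
termination_by f parts => (sizeOf f, parts.length)

-- A's `render`: `is_last` = the entry is the last item, i.e. the sibling rest is {}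
def PvForest.render : PvForest → String → List String
  | .nil, _ => []
  | .cons name child rest, pfx =>
      (pfx ++ (if rest = PvForest.nil then "└── " else "├── ") ++ name)
        :: ((if child ≠ PvForest.nil then
               PvForest.render child (pfx ++ (if rest = PvForest.nil then "    " else "│   "))
             else []) ++ PvForest.render rest pfx)

-- `path.replace("\\", "/").strip("/").split("/")`; the `.getD []` is never taken ("/" ≠ "")
def pvClean (p : String) : List String :=
  (PySem.Str.split? (PySem.Str.stripChars (PySem.Str.replace p "\\" "/") "/") "/").getD []

def get_file_tree_from_dict (files : List (String × String)) : String :=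
  if files.isEmpty then "(no files)"
  else
    let keys := PySem.List.sorted (PySem.List.dedup (files.map Prod.fst)) (fun x => x) false
    let tree := keys.foldl (fun t p => PvForest.insertParts t (pvClean p)) PvForest.nil
    PySem.Str.join "\n" (PvForest.render tree "")

-- ===== PORT B =====
-- spec-level description of what Source B's grouping loop collects for head `h`:
-- `[p[1:] for p in group if p[0] == h and len(p) > 1]` (group elements are always
-- nonempty — split pieces, or tails of lists of length > 1 — so `p.headD ""` is p[0])
def pvTails (group : List (List String)) (h : String) : List (List String) :=
  (group.filter (fun p => p.headD "" == h && decide (1 < p.length))).map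
    (fun p => PySem.List.slice p (some 1) none)

theorem pvTails_cons_pos (p : List String) (ps : List (List String)) (h : String)
    (h1 : p.headD "" = h) (h2 : 1 < p.length) :
    pvTails (p :: ps) h = p.drop 1 :: pvTails ps h := by
  have htrue : (p.headD "" == h && decide (1 < p.length)) = true := by rw [h1]; simp [h2]
  simp only [pvTails, List.filter_cons, htrue, if_true, List.map_cons]
  rw [PySem.List.slice_from p (a := 1) (by norm_num)]
  norm_num

theorem pvTails_cons_neg (p : List String) (ps : List (List String)) (h : String)
    (hc : ¬(p.headD "" = h ∧ 1 < p.length)) :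
    pvTails (p :: ps) h = pvTails ps h := by
  have hfalse : (p.headD "" == h && decide (1 < p.length)) = false := by
    rcases Decidable.not_and_iff_not_or_not.1 hc with h' | h'
    · simp only [beq_eq_false_iff_ne.2 h', Bool.false_and]
    · simp only [decide_eq_false h', Bool.and_false]
  simp only [pvTails, List.filter_cons, hfalse, Bool.false_eq_true, if_false]

-- termination helper for the render loop below (cited in its decreasing_by)
theorem pvTails_mu_le (group : List (List String)) (h : String) :
    ((pvTails group h).map List.length).sum + (pvTails group h).length
      ≤ (group.map List.length).sum := by
  induction group with
  | nil => simp [pvTails]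
  | cons p g ih =>
      have hs : ∀ q : List String, (PySem.List.slice q (some 1) none).length = q.length - 1 := by
        intro q; rw [PySem.List.slice_from q (a := 1) (by norm_num)]; simp
      by_cases hp : (p.headD "" == h && decide (1 < p.length)) = true
      · have hlen : 1 < p.length := by
          simp only [Bool.and_eq_true, decide_eq_true_eq] at hp; exact hp.2
        simp only [pvTails, List.filter_cons, hp, if_true, List.map_cons, List.sum_cons,
          List.length_cons, List.length_map, hs] at ih ⊢
        omega
      · simp only [pvTails, List.filter_cons, hp, Bool.false_eq_true, if_false,
          List.length_map, List.map_cons, List.sum_cons] at ih ⊢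
        omega

-- one iteration of Source B's grouping loop:
-- `h = p[0]
--  if h not in tails: tails[h] = []; heads.append(h)
--  if len(p) > 1: tails[h].append(p[1:])`
def pvGroupStep (acc : List String × PySem.Dict String (List (List String)))
    (p : List String) : List String × PySem.Dict String (List (List String)) :=
  let h := p.headD ""
  let acc2 := if acc.2.contains h then acc else (acc.1 ++ [h], acc.2.insert h [])
  if 1 < p.length then
    (acc2.1, acc2.2.modify h [] (fun l => l ++ [PySem.List.slice p (some 1) none]))
  else acc2

-- `heads = []; tails = {}; for p in group: ...` — one pass over the level's paths
def pvGroup (group : List (List String)) :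
    List String × PySem.Dict String (List (List String)) :=
  group.foldl pvGroupStep ([], PySem.Dict.empty)

theorem pvGroupStep_getD (acc : List String × PySem.Dict String (List (List String)))
    (p : List String) (h : String) :
    (pvGroupStep acc p).2.getD h []
      = acc.2.getD h []
        ++ (if p.headD "" = h ∧ 1 < p.length then [PySem.List.slice p (some 1) none]
            else []) := by
  have hmiss : ∀ (d : PySem.Dict String (List (List String))) (k : String),
      d.contains k = false → d.getD k [] = [] := by
    intro d k hc
    simp [PySem.Dict.getD, (PySem.Dict.get?_eq_none_iff_contains d k).2 hc]
  unfold pvGroupStep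
  simp only [List.headD_eq_head?_getD]
  by_cases hch : p.head?.getD "" = h
  · rw [hch]
    by_cases hcon : acc.2.contains h = true
    · by_cases hlen : 1 < p.length
      · simp [hcon, hlen]
      · simp [hcon, hlen]
    · simp only [Bool.not_eq_true] at hcon
      have hg := hmiss acc.2 h hcon
      by_cases hlen : 1 < p.length
      · simp [hcon, hlen, hg]
      · simp [hcon, hlen, hg]
  · by_cases hcon : acc.2.contains (p.head?.getD "") = true
    · by_cases hlen : 1 < p.length
      · simp [hcon, hlen, hch, PySem.Dict.getD_modify, Ne.symm hch]
      · simp [hcon, hlen, hch]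
    · by_cases hlen : 1 < p.length
      · simp [hcon, hlen, hch, PySem.Dict.getD_modify, PySem.Dict.getD_insert, Ne.symm hch]
      · simp [hcon, hlen, hch, PySem.Dict.getD_insert, Ne.symm hch]

theorem pvGroup_getD_aux :
    ∀ (g : List (List String)) (acc : List String × PySem.Dict String (List (List String)))
      (h : String),
      (g.foldl pvGroupStep acc).2.getD h [] = acc.2.getD h [] ++ pvTails g h := by
  intro g
  induction g with
  | nil => intro acc h; simp [pvTails]
  | cons p g ih =>
      intro acc h
      rw [List.foldl_cons, ih (pvGroupStep acc p) h, pvGroupStep_getD]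
      by_cases hc : p.headD "" = h ∧ 1 < p.length
      · rw [pvTails_cons_pos _ _ _ hc.1 hc.2, if_pos hc, List.append_assoc]
        rw [PySem.List.slice_from p (a := 1) (by norm_num)]
        norm_num
      · rw [pvTails_cons_neg _ _ _ hc, if_neg hc, List.append_nil]

-- the grouping dict holds exactly the per-head tails (cited by decreasing_by below)
theorem pvGroup_getD (g : List (List String)) (h : String) :
    (pvGroup g).2.getD h [] = pvTails g h := by
  rw [pvGroup, pvGroup_getD_aux]
  simp [PySem.Dict.getD_empty]

-- the `for i, h in enumerate(heads)` loop of Source B's `render`; `tails[h]` is the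
-- grouping dict's entry, and the recursive call inlines render's grouping pass
def pvRenderLoop : List (List String) → String → List String → List String
  | _, _, [] => []
  | group, pfx, h :: hs =>
      (pfx ++ (if hs.isEmpty then "└── " else "├── ") ++ h)
        :: ((if ((pvGroup group).2.getD h []).isEmpty then []
             else pvRenderLoop ((pvGroup group).2.getD h [])
                    (pfx ++ (if hs.isEmpty then "    " else "│   "))
                    (pvGroup ((pvGroup group).2.getD h [])).1)
            ++ pvRenderLoop group pfx hs)
termination_by group _ hs => ((group.map List.length).sum + group.length, hs.length)
decreasing_by
  · exact Prod.Lex.left _ _ (by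
      rw [pvGroup_getD] at *
      have := pvTails_mu_le group h
      have hg : 1 ≤ group.length := by
        cases group with
        | nil => simp [pvTails] at *
        | cons a l => simp
      omega)
  · exact Prod.Lex.right _ (by simp)

def get_file_tree_from_dict_alt (files : List (String × String)) : String :=
  if files.isEmpty then "(no files)"
  else
    let paths := (PySem.List.sorted (PySem.List.dedup (files.map Prod.fst)) (fun x => x) false).map pvClean
    PySem.Str.join "\n" (pvRenderLoop paths "" (pvGroup paths).1)

-- ===== PRECONDITION & SPEC =====
def Spec_get_file_tree_from_dict (files : List (String × String)) (out : String) : Prop := out = get_file_tree_from_dict_alt files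
instance (files : List (String × String)) (out : String) : Decidable (Spec_get_file_tree_from_dict files out) := by unfold Spec_get_file_tree_from_dict; infer_instance

-- ===== CLAIM (what is proved, stated in full; the proofs are below) =====
def Claim_equal_get_file_tree_from_dict : Prop := ∀ (files : List (String × String)), Dom_get_file_tree_from_dict files → Spec_get_file_tree_from_dict files (get_file_tree_from_dict files)

-- ===== LEMMAS AND PROOFS =====

-- size measure: total number of components plus number of paths
def pvMu (g : List (List String)) : Nat := (g.map List.length).sum + g.length

-- `group` with every path whose first component is `h` removed
def pvRest (group : List (List String)) (h : String) : List (List String) :=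
  group.filter (fun q => !(q.headD "" == h))

theorem pvInsertParts_nilParts : ∀ f : PvForest, f.insertParts [] = f := by
  intro f; cases f <;> rw [PvForest.insertParts]

theorem pvRenderLoop_nilHeads (g : List (List String)) (pfx : String) :
    pvRenderLoop g pfx [] = [] := by
  rw [pvRenderLoop]

theorem pvRenderLoop_cons (g : List (List String)) (pfx : String) (h : String)
    (hs : List String) :
    pvRenderLoop g pfx (h :: hs)
      = (pfx ++ (if hs.isEmpty then "└── " else "├── ") ++ h)
        :: ((if (pvTails g h).isEmpty then []
             else pvRenderLoop (pvTails g h)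
                    (pfx ++ (if hs.isEmpty then "    " else "│   "))
                    (pvGroup (pvTails g h)).1)
            ++ pvRenderLoop g pfx hs) := by
  rw [pvRenderLoop]
  simp only [pvGroup_getD]

theorem pvRest_cons_pos (p : List String) (ps : List (List String)) (h : String)
    (h1 : p.headD "" = h) : pvRest (p :: ps) h = pvRest ps h := by
  have hfalse : (!(p.headD "" == h)) = false := by rw [h1]; simp
  simp only [pvRest, List.filter_cons, hfalse, Bool.false_eq_true, if_false]

theorem pvRest_cons_neg (p : List String) (ps : List (List String)) (h : String)
    (h1 : p.headD "" ≠ h) : pvRest (p :: ps) h = p :: pvRest ps h := by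
  have htrue : (!(p.headD "" == h)) = true := by simp only [beq_eq_false_iff_ne.2 h1, Bool.not_false]
  simp only [pvRest, List.filter_cons, htrue, if_true]

theorem pvTails_nil (h : String) : pvTails [] h = [] := rfl
theorem pvRest_nil (h : String) : pvRest [] h = [] := rfl

theorem pvMu_filter_le (q : List String → Bool) (g : List (List String)) :
    pvMu (g.filter q) ≤ pvMu g := by
  induction g with
  | nil => simp [pvMu]
  | cons p g ih =>
      simp only [pvMu, List.filter_cons, List.map_cons, List.sum_cons, List.length_cons] at ih ⊢
      by_cases hp : q p = true
      · simp only [hp, if_true, List.map_cons, List.sum_cons, List.length_cons]; omega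
      · simp only [hp, Bool.false_eq_true, if_false]; omega

theorem pvRest_mu_lt (p : List String) (ps : List (List String)) :
    pvMu (pvRest (p :: ps) (p.headD "")) < pvMu (p :: ps) := by
  rw [pvRest_cons_pos _ _ _ rfl]
  have h2 := pvMu_filter_le (fun q => !(q.headD "" == p.headD "")) ps
  simp only [pvRest, pvMu, List.map_cons, List.sum_cons, List.length_cons] at *
  omega

theorem pvTails_mu_lt (p : List String) (ps : List (List String)) (h : String) :
    pvMu (pvTails (p :: ps) h) < pvMu (p :: ps) := by
  have h1 := pvTails_mu_le (p :: ps) h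
  simp only [pvMu, List.map_cons, List.sum_cons, List.length_cons] at *
  omega

-- the tree a list of paths builds, characterised by grouping on first components
def pvFromGroups : List (List String) → PvForest
  | [] => .nil
  | p :: ps =>
      .cons (p.headD "") (pvFromGroups (pvTails (p :: ps) (p.headD "")))
        (pvFromGroups (pvRest (p :: ps) (p.headD "")))
termination_by g => pvMu g
decreasing_by
  · exact pvTails_mu_lt p ps (p.headD "")
  · exact pvRest_mu_lt p ps

-- the tree obtained by inserting every path of `ps` into the forest `f`
def pvMergeSpec : PvForest → List (List String) → PvForest
  | .nil, ps => pvFromGroups ps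
  | .cons n c r, ps => .cons n (pvMergeSpec c (pvTails ps n)) (pvMergeSpec r (pvRest ps n))

theorem pvMergeSpec_nilForest (ps : List (List String)) :
    pvMergeSpec PvForest.nil ps = pvFromGroups ps := rfl

theorem pvMergeSpec_nilList : ∀ f : PvForest, pvMergeSpec f [] = f := by
  intro f
  induction f with
  | nil => rw [pvMergeSpec_nilForest, pvFromGroups]
  | cons n c r ihc ihr => simp [pvMergeSpec, pvTails_nil, pvRest_nil, ihc, ihr]

-- inserting one path then merging a list = merging the path consed on the list
theorem pvMerge_insert : ∀ (f : PvForest) (p : List String) (ps : List (List String)), p ≠ [] →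
    pvMergeSpec (PvForest.insertParts f p) ps = pvMergeSpec f (p :: ps) := by
  intro f
  induction f with
  | nil =>
      intro p
      induction p with
      | nil => intro ps hp; exact absurd rfl hp
      | cons h pr ihp =>
          intro ps _
          rw [show PvForest.insertParts PvForest.nil (h :: pr)
                = PvForest.cons h (PvForest.insertParts PvForest.nil pr) PvForest.nil from by
              rw [PvForest.insertParts]]
          rw [pvMergeSpec_nilForest, pvFromGroups]
          simp only [List.headD_cons]
          by_cases hpr : pr = []
          · subst hpr
            rw [pvTails_cons_neg _ _ _ (by simp), pvRest_cons_pos _ _ _ (by simp)]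
            rw [pvInsertParts_nilParts]
            rfl
          · rw [pvTails_cons_pos _ _ _ (by simp) (by cases pr <;> simp_all),
              pvRest_cons_pos _ _ _ (by simp)]
            rw [show (h :: pr).drop 1 = pr from rfl]
            show PvForest.cons h
                (pvMergeSpec (PvForest.insertParts PvForest.nil pr) (pvTails ps h))
                (pvMergeSpec PvForest.nil (pvRest ps h))
              = PvForest.cons h (pvFromGroups (pr :: pvTails ps h)) (pvFromGroups (pvRest ps h))
            rw [ihp (pvTails ps h) hpr]
            rfl
  | cons n c r ihc ihr =>
      intro p ps hp
      obtain ⟨h, pr, rfl⟩ : ∃ h pr, p = h :: pr := by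
        cases p with
        | nil => exact absurd rfl hp
        | cons a b => exact ⟨a, b, rfl⟩
      by_cases hnh : n = h
      · subst hnh
        rw [show PvForest.insertParts (PvForest.cons n c r) (n :: pr)
              = PvForest.cons n (PvForest.insertParts c pr) r from by
            rw [PvForest.insertParts]; simp]
        show PvForest.cons n (pvMergeSpec (PvForest.insertParts c pr) (pvTails ps n))
              (pvMergeSpec r (pvRest ps n))
            = pvMergeSpec (PvForest.cons n c r) ((n :: pr) :: ps)
        rw [show pvMergeSpec (PvForest.cons n c r) ((n :: pr) :: ps)
              = PvForest.cons n (pvMergeSpec c (pvTails ((n :: pr) :: ps) n))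
                (pvMergeSpec r (pvRest ((n :: pr) :: ps) n)) from rfl]
        rw [pvRest_cons_pos _ _ _ (by simp)]
        by_cases hpr : pr = []
        · subst hpr
          rw [pvTails_cons_neg _ _ _ (by simp), pvInsertParts_nilParts]
        · rw [pvTails_cons_pos _ _ _ (by simp) (by cases pr <;> simp_all)]
          rw [show (n :: pr).drop 1 = pr from rfl]
          rw [ihc pr (pvTails ps n) hpr]
      · rw [show PvForest.insertParts (PvForest.cons n c r) (h :: pr)
              = PvForest.cons n c (PvForest.insertParts r (h :: pr)) from by
            rw [PvForest.insertParts]; simp [hnh]]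
        show PvForest.cons n (pvMergeSpec c (pvTails ps n))
              (pvMergeSpec (PvForest.insertParts r (h :: pr)) (pvRest ps n))
            = pvMergeSpec (PvForest.cons n c r) ((h :: pr) :: ps)
        rw [show pvMergeSpec (PvForest.cons n c r) ((h :: pr) :: ps)
              = PvForest.cons n (pvMergeSpec c (pvTails ((h :: pr) :: ps) n))
                (pvMergeSpec r (pvRest ((h :: pr) :: ps) n)) from rfl]
        rw [pvTails_cons_neg _ _ _ (fun hc => hnh (by simpa using hc.1.symm)),
          pvRest_cons_neg _ _ _ (by simpa using Ne.symm hnh)]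
        rw [ihr (h :: pr) (pvRest ps n) (by simp)]

theorem pvFold_eq_mergeSpec : ∀ (ps : List (List String)) (f : PvForest),
    (∀ q ∈ ps, q ≠ []) → ps.foldl PvForest.insertParts f = pvMergeSpec f ps := by
  intro ps
  induction ps with
  | nil => intro f _; simp [pvMergeSpec_nilList]
  | cons p ps ih =>
      intro f hq
      rw [List.foldl_cons, ih _ (fun q hq' => hq q (List.mem_cons_of_mem _ hq')),
        pvMerge_insert f p ps (hq p (List.mem_cons_self ..))]

-- ---- heads as a PySem.Set ----

-- first-occurrence list of first components (what Source B's `heads` list holds)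
def pvHeads (group : List (List String)) : List String :=
  group.foldl (fun hs p => PySem.Set.add hs (p.headD "")) []

theorem pvSet_foldl_add_cons (l : List String) (x : String) (t : List String) :
    List.foldl PySem.Set.add (x :: t) l
      = x :: List.foldl PySem.Set.add t (l.filter (fun y => !(y == x))) := by
  induction l generalizing t with
  | nil => simp
  | cons y l ih =>
      by_cases hyx : y = x
      · subst hyx
        have h1 : (!(y == y)) = false := by simp
        simp only [List.foldl_cons, List.filter_cons, h1, Bool.false_eq_true, if_false]
        rw [show PySem.Set.add (y :: t) y = y :: t from by
          simp [PySem.Set.add, PySem.Set.contains]]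
        exact ih t
      · have h1 : (!(y == x)) = true := by simp [hyx]
        simp only [List.foldl_cons, List.filter_cons, h1, if_true]
        rw [show PySem.Set.add (x :: t) y = x :: PySem.Set.add t y from by
          have h2 : (y == x) = false := by simp [hyx]
          simp only [PySem.Set.add, PySem.Set.contains, List.contains_cons, h2, Bool.false_or]
          split <;> simp]
        exact ih (PySem.Set.add t y)

theorem pvOfList_cons (x : String) (l : List String) :
    PySem.Set.ofList (x :: l) = x :: PySem.Set.ofList (l.filter (fun y => !(y == x))) := by
  rw [PySem.Set.ofList_eq_foldl, PySem.Set.ofList_eq_foldl, List.foldl_cons]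
  rw [show PySem.Set.add ([] : List String) x = [x] from rfl]
  exact pvSet_foldl_add_cons l x []

theorem pvOfList_eq_nil_iff (l : List String) : PySem.Set.ofList l = [] ↔ l = [] := by
  cases l with
  | nil => simp [PySem.Set.ofList]
  | cons x l => simp [pvOfList_cons]

theorem pvHeads_eq (g : List (List String)) :
    pvHeads g = PySem.Set.ofList (g.map (fun q => q.headD "")) := by
  rw [pvHeads, PySem.Set.ofList_eq_foldl, List.foldl_map]

theorem pvGroupStep_fst_keys
    (acc : List String × PySem.Dict String (List (List String))) (p : List String)
    (hinv : acc.2.keys = acc.1) :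
    (pvGroupStep acc p).1 = PySem.Set.add acc.1 (p.headD "")
      ∧ (pvGroupStep acc p).2.keys = (pvGroupStep acc p).1 := by
  unfold pvGroupStep
  have hck : acc.2.contains (p.headD "") = PySem.Set.contains acc.1 (p.headD "") := by
    rw [PySem.Dict.contains_eq_decide_mem_keys, hinv, PySem.Set.contains]
    simp
  by_cases hcon : acc.2.contains (p.headD "") = true
  · have hadd : PySem.Set.add acc.1 (p.headD "") = acc.1 := by
      rw [PySem.Set.add, ← hck, hcon]; simp
    by_cases hlen : 1 < p.length
    · simp only [hcon, if_true, hlen]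
      refine ⟨hadd.symm, ?_⟩
      rw [PySem.Dict.keys_modify, PySem.Dict.keys_insert_of_contains _ _ hcon, hinv]
    · simp only [hcon, if_true, hlen, if_false]
      exact ⟨hadd.symm, hinv⟩
  · simp only [Bool.not_eq_true] at hcon
    have hadd : PySem.Set.add acc.1 (p.headD "") = acc.1 ++ [p.headD ""] := by
      rw [PySem.Set.add, ← hck, hcon]; simp
    have hkeys2 : (acc.2.insert (p.headD "") []).keys = acc.1 ++ [p.headD ""] := by
      rw [PySem.Dict.keys_insert_of_not_contains _ _ hcon, hinv]
    by_cases hlen : 1 < p.length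
    · simp only [hcon, Bool.false_eq_true, if_false, hlen, if_true]
      refine ⟨hadd.symm, ?_⟩
      rw [PySem.Dict.keys_modify, PySem.Dict.keys_insert_of_contains, hkeys2]
      simp [PySem.Dict.contains_insert_self]
    · simp only [hcon, Bool.false_eq_true, if_false, hlen]
      exact ⟨hadd.symm, hkeys2⟩

theorem pvGroup_fst_aux :
    ∀ (g : List (List String)) (acc : List String × PySem.Dict String (List (List String))),
      acc.2.keys = acc.1 →
      (g.foldl pvGroupStep acc).1
        = List.foldl PySem.Set.add acc.1 (g.map (fun q => q.headD "")) := by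
  intro g
  induction g with
  | nil => intro acc _; rfl
  | cons p g ih =>
      intro acc hinv
      obtain ⟨h1, h2⟩ := pvGroupStep_fst_keys acc p hinv
      rw [List.foldl_cons, List.map_cons, List.foldl_cons,
        ih (pvGroupStep acc p) (by rw [h2]), h1]

theorem pvGroup_fst (g : List (List String)) : (pvGroup g).1 = pvHeads g := by
  rw [pvGroup, pvGroup_fst_aux g ([], PySem.Dict.empty) (by simp [PySem.Dict.keys_empty]),
    pvHeads, List.foldl_map]

theorem pvRest_map_headD (g : List (List String)) (h : String) :
    (pvRest g h).map (fun q => q.headD "")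
      = (g.map (fun q => q.headD "")).filter (fun y => !(y == h)) := by
  induction g with
  | nil => rfl
  | cons p g ih =>
      by_cases hp : p.headD "" = h
      · have h1 : (!(p.headD "" == h)) = false := by rw [hp]; simp
        rw [pvRest_cons_pos _ _ _ hp, List.map_cons, List.filter_cons, h1]
        simp only [Bool.false_eq_true, if_false]
        exact ih
      · have h1 : (!(p.headD "" == h)) = true := by simp only [beq_eq_false_iff_ne.2 hp, Bool.not_false]
        rw [pvRest_cons_neg _ _ _ hp, List.map_cons, List.map_cons, List.filter_cons, h1]
        simp only [if_true]
        rw [ih]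

theorem pvHeads_cons (p : List String) (ps : List (List String)) :
    pvHeads (p :: ps) = p.headD "" :: pvHeads (pvRest (p :: ps) (p.headD "")) := by
  rw [pvHeads_eq, pvHeads_eq, List.map_cons, pvOfList_cons,
    pvRest_cons_pos _ _ _ rfl, pvRest_map_headD]

theorem pvHeads_eq_nil_iff (g : List (List String)) : pvHeads g = [] ↔ g = [] := by
  rw [pvHeads_eq, pvOfList_eq_nil_iff, List.map_eq_nil_iff]

theorem pvHeads_rest_ne (ps : List (List String)) (h : String) :
    ∀ h' ∈ pvHeads (pvRest ps h), h' ≠ h := by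
  intro h' hmem
  rw [pvHeads_eq] at hmem
  have h1 := (PySem.Set.mem_ofList _ _).1 hmem
  rw [pvRest_map_headD] at h1
  have h2 := List.of_mem_filter h1
  simpa using h2

theorem pvTails_rest (g : List (List String)) (h h' : String) (hne : h' ≠ h) :
    pvTails (pvRest g h) h' = pvTails g h' := by
  induction g with
  | nil => rfl
  | cons p g ih =>
      by_cases hp : p.headD "" = h
      · rw [pvRest_cons_pos _ _ _ hp, ih,
          pvTails_cons_neg _ _ _ (fun hc => hne (by rw [← hc.1, hp]))]
      · rw [pvRest_cons_neg _ _ _ hp]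
        by_cases hp' : p.headD "" = h' ∧ 1 < p.length
        · rw [pvTails_cons_pos _ _ _ hp'.1 hp'.2, pvTails_cons_pos _ _ _ hp'.1 hp'.2, ih]
        · rw [pvTails_cons_neg _ _ _ hp', pvTails_cons_neg _ _ _ hp', ih]

theorem pvRenderLoop_congr : ∀ (hs : List String) (g g' : List (List String)) (pfx : String),
    (∀ h' ∈ hs, pvTails g h' = pvTails g' h') →
    pvRenderLoop g pfx hs = pvRenderLoop g' pfx hs := by
  intro hs
  induction hs with
  | nil => intro g g' pfx _; rw [pvRenderLoop_nilHeads, pvRenderLoop_nilHeads]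
  | cons h hs ih =>
      intro g g' pfx hcomp
      rw [pvRenderLoop_cons, pvRenderLoop_cons]
      rw [hcomp h (List.mem_cons_self ..)]
      rw [ih g g' pfx (fun h' hm => hcomp h' (List.mem_cons_of_mem _ hm))]

theorem pvFromGroups_eq_nil_iff (g : List (List String)) :
    pvFromGroups g = PvForest.nil ↔ g = [] := by
  cases g with
  | nil => simp [pvFromGroups]
  | cons p ps => rw [pvFromGroups]; simp

theorem pvRender_fromGroups : ∀ (n : Nat) (g : List (List String)) (pfx : String), pvMu g ≤ n →
    (pvFromGroups g).render pfx = pvRenderLoop g pfx (pvHeads g) := by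
  intro n
  induction n with
  | zero =>
      intro g pfx hmu
      cases g with
      | nil => rw [show pvFromGroups [] = PvForest.nil from by rw [pvFromGroups]]
               rw [show pvHeads [] = [] from rfl, pvRenderLoop_nilHeads, PvForest.render]
      | cons p ps => simp [pvMu] at hmu
  | succ n ih =>
      intro g pfx hmu
      cases g with
      | nil => rw [show pvFromGroups [] = PvForest.nil from by rw [pvFromGroups]]
               rw [show pvHeads [] = [] from rfl, pvRenderLoop_nilHeads, PvForest.render]
      | cons p ps =>
          have hrest := pvRest_mu_lt p ps
          have htails := pvTails_mu_lt p ps (p.headD "")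
          rw [pvFromGroups, pvHeads_cons, pvRenderLoop_cons, PvForest.render]
          simp only [pvFromGroups_eq_nil_iff, ne_eq, List.isEmpty_iff, pvHeads_eq_nil_iff,
            ite_not]
          congr 1
          congr 1
          · split
            · rfl
            · rw [ih _ _ (by simp only [pvMu] at hmu htails ⊢; omega), pvGroup_fst]
          · rw [ih _ _ (by simp only [pvMu] at hmu hrest ⊢; omega)]
            exact pvRenderLoop_congr _ _ _ _ (fun h' hm =>
              pvTails_rest (p :: ps) (p.headD "") h' (pvHeads_rest_ne (p :: ps) _ h' hm))

-- ---- cleaning never yields an empty list ----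

theorem pvSplitOnGo_ne_nil (sep : List Char) :
    ∀ (fuel : Nat) (l cur : List Char) (acc : List (List Char)),
      PySem.Chars.splitOn.go sep fuel l cur acc ≠ [] := by
  intro fuel
  induction fuel with
  | zero => intro l cur acc; simp [PySem.Chars.splitOn.go]
  | succ fuel ih =>
      intro l cur acc
      cases l with
      | nil => simp [PySem.Chars.splitOn.go]
      | cons c rest =>
          rw [PySem.Chars.splitOn.go]
          split
          · exact ih _ _ _
          · exact ih _ _ _

theorem pvClean_ne_nil (p : String) : pvClean p ≠ [] := by
  unfold pvClean PySem.Str.split? PySem.Chars.split?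
  rw [show (("/" : String).toList) = ['/'] from rfl]
  simp only [List.isEmpty_cons, Bool.false_eq_true, if_false, Option.map_some, Option.getD_some,
    ne_eq, List.map_eq_nil_iff]
  rw [PySem.Chars.splitOn]
  exact pvSplitOnGo_ne_nil _ _ _ _ _

-- ===== VERDICT (by name: the statement is the Claim_ definition above) =====
theorem get_file_tree_from_dict_spec : Claim_equal_get_file_tree_from_dict := by
  intro files _
  show get_file_tree_from_dict files = get_file_tree_from_dict_alt files
  unfold get_file_tree_from_dict get_file_tree_from_dict_alt
  by_cases hemp : files.isEmpty
  · simp [hemp]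
  · simp only [hemp, Bool.false_eq_true, if_false]
    set keys := PySem.List.sorted (PySem.List.dedup (files.map Prod.fst)) (fun x => x) false with hkeys
    have h1 : keys.foldl (fun t p => PvForest.insertParts t (pvClean p)) PvForest.nil
        = (keys.map pvClean).foldl PvForest.insertParts PvForest.nil := List.foldl_map.symm
    have h2 : (keys.map pvClean).foldl PvForest.insertParts PvForest.nil
        = pvMergeSpec PvForest.nil (keys.map pvClean) :=
      pvFold_eq_mergeSpec _ _ (by
        intro q hq
        obtain ⟨p, _, rfl⟩ := List.mem_map.1 hq
        exact pvClean_ne_nil p)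
    rw [h1, h2, pvMergeSpec_nilForest, pvGroup_fst,
      pvRender_fromGroups (pvMu (keys.map pvClean)) _ _ le_rfl]
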